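-- pv_equiv track=rewrite | github.com/zmelce/factcheck | factcheck_pipeline/publisherFR/factuelafp/factuelafp_videos.py | dedupe_keep_shortest
-- ===== SOURCE A (Python) =====
-- def dedupe_keep_shortest(urls):
--     urls = sorted(set(urls), key=lambda x: (len(x), x))
--     kept = []
--     for u in urls:
--         if any(u.startswith(k) for k in kept):
--             continue
--         kept = [k for k in kept if not k.startswith(u)]
--         kept.append(u)
--     return kept
-- ===== SOURCE B (Python) =====
-- def dedupe_keep_shortest(urls):
--     s = set(urls)
--     ordered = sorted(s, key=lambda x: (len(x), x))
--     return [u for u in ordered if not any(u[:i] in s for i in range(len(u)))]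
-- ===== Notes on version B (the rewrite author's own statement) =====
-- stated objective: alternative
-- what changed: A rescans its growing kept list (any/startswith plus a re-filter) for every URL; B builds one hash set of all URLs and keeps a sorted URL iff none of its proper prefixes is in that set, so the stateful inner scan over kept disappears.
import Mathlib
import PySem

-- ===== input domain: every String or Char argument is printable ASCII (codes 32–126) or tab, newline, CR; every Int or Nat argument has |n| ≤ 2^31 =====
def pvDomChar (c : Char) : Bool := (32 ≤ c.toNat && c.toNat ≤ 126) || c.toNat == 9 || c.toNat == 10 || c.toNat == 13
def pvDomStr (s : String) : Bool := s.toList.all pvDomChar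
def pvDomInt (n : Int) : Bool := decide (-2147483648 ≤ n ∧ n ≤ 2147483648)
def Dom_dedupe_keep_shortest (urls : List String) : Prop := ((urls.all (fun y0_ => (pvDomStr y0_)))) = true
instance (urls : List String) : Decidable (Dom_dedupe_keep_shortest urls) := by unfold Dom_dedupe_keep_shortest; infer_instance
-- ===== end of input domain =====

-- B replaces A's stateful rescan of the kept list by one hash set of all URLs and a
-- per-URL proper-prefix membership test, keeping the same sorted output order (objective: alternative).

-- ===== PORT A =====
def dedupe_keep_shortest (urls : List String) : List String :=
  -- urls = sorted(set(urls), key=lambda x: (len(x), x))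
  let urls' := PySem.List.sorted2 (PySem.Set.ofList urls) (fun x => PySem.Str.len x) (fun x => x) false
  -- for u in urls: … (kept accumulated left to right)
  urls'.foldl
    (fun kept u =>
      if kept.any (fun k => PySem.Str.startswith u k) then kept
      else kept.filter (fun k => !(PySem.Str.startswith k u)) ++ [u])
    []

-- ===== PORT B =====
-- not any(u[:i] in s for i in range(len(u)))
def pvKeepB (s : PySem.Set String) (u : String) : Bool :=
  !((PySem.List.pyRange 0 (PySem.Str.len u) 1).any
      (fun i => PySem.Set.contains s (PySem.Str.slice u none (some i))))

def dedupe_keep_shortest_alt (urls : List String) : List String :=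
  let s := PySem.Set.ofList urls
  let ordered := PySem.List.sorted2 s (fun x => PySem.Str.len x) (fun x => x) false
  ordered.filter (fun u => pvKeepB s u)

-- ===== PRECONDITION & SPEC =====
def Spec_dedupe_keep_shortest (urls : List String) (out : List String) : Prop := out = dedupe_keep_shortest_alt urls
instance (urls : List String) (out : List String) : Decidable (Spec_dedupe_keep_shortest urls out) := by unfold Spec_dedupe_keep_shortest; infer_instance

-- ===== CLAIM (what is proved, stated in full; the proofs are below) =====
def Claim_equal_dedupe_keep_shortest : Prop := ∀ (urls : List String), Dom_dedupe_keep_shortest urls → Spec_dedupe_keep_shortest urls (dedupe_keep_shortest urls)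

-- ===== LEMMAS AND PROOFS =====

-- A's sort with tuple key (len(x), x) is the sort by the lexicographic key into Lex (ℤ × String).
lemma pv_sorted2_eq_sorted_lex (xs : List String) :
    PySem.List.sorted2 xs (fun x => PySem.Str.len x) (fun x => x) false
      = PySem.List.sorted xs (fun x => toLex (PySem.Str.len x, x)) false := by
  have hbefore : (fun a b : String =>
        decide (PySem.Str.len a < PySem.Str.len b) ||
          (!decide (PySem.Str.len b < PySem.Str.len a) && decide (a < b)))
      = fun a b : String => decide (toLex (PySem.Str.len a, a) < toLex (PySem.Str.len b, b)) := by
    funext a b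
    rcases lt_trichotomy (PySem.Str.len a) (PySem.Str.len b) with h | h | h
    · have h' : a.length < b.length := by
        rw [PySem.Str.len_eq, PySem.Str.len_eq] at h; simpa using h
      simp [Prod.Lex.lt_iff, h', Nat.lt_asymm h']
    · have h' : a.length = b.length := by
        rw [PySem.Str.len_eq, PySem.Str.len_eq] at h; simpa using h
      simp [Prod.Lex.lt_iff, h']
    · have h' : b.length < a.length := by
        rw [PySem.Str.len_eq, PySem.Str.len_eq] at h; simpa using h
      simp [Prod.Lex.lt_iff, h', Nat.lt_asymm h', ne_of_gt h']
  simp only [PySem.List.sorted2, PySem.List.sorted]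
  simp only [if_neg (by decide : ¬ (false = true))]
  rw [hbefore]

lemma pv_sorted2_len_pairwise (xs : List String) :
    (PySem.List.sorted2 xs (fun x => PySem.Str.len x) (fun x => x) false).Pairwise
      (fun a b => PySem.Str.len a ≤ PySem.Str.len b) := by
  rw [pv_sorted2_eq_sorted_lex]
  refine (PySem.List.sorted_pairwise xs (fun x => toLex (PySem.Str.len x, x))).imp ?_
  intro a b h
  rcases Prod.Lex.le_iff.mp h with h' | ⟨h', _⟩
  · exact le_of_lt h'
  · exact le_of_eq h'

lemma pv_proper_prefix_length_lt {p u : String}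
    (hpre : p.toList <+: u.toList) (hne : p ≠ u) :
    p.toList.length < u.toList.length :=
  lt_of_le_of_ne hpre.length_le
    (fun h => hne (String.toList_inj.mp (hpre.eq_of_length_le (le_of_eq h.symm))))

lemma pv_any_prefix_iff (s : List String) (u : String) :
    ((PySem.List.pyRange 0 (PySem.Str.len u) 1).any
        (fun i => PySem.Set.contains s (PySem.Str.slice u none (some i))) = true)
      ↔ ∃ p ∈ s, p.toList <+: u.toList ∧ p ≠ u := by
  rw [List.any_eq_true]
  constructor
  · rintro ⟨i, hi, hc⟩
    rw [PySem.List.mem_pyRange_one] at hi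
    have htl : (PySem.Str.slice u none (some i)).toList = u.toList.take i.toNat := by
      simp [PySem.Str.slice, PySem.List.slice_to _ hi.1]
    refine ⟨_, (PySem.Set.contains_iff s _).mp hc, ?_, ?_⟩
    · rw [htl]; exact List.take_prefix _ _
    · intro he
      have hlen : i < (u.toList.length : Int) := by
        have := hi.2; rw [PySem.Str.len_eq] at this; exact this
      have : (PySem.Str.slice u none (some i)).toList.length < u.toList.length := by
        rw [htl, List.length_take]; omega
      rw [he] at this; omega
  · rintro ⟨p, hp, hpre, hne⟩
    have hlt : p.toList.length < u.toList.length := pv_proper_prefix_length_lt hpre hne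
    refine ⟨(p.toList.length : Int), ?_, ?_⟩
    · rw [PySem.List.mem_pyRange_one, PySem.Str.len_eq]
      constructor <;> [positivity; exact_mod_cast hlt]
    · rw [PySem.Set.contains_iff]
      have : PySem.Str.slice u none (some (p.toList.length : Int)) = p := by
        apply String.toList_inj.mp
        have h0 : (0 : Int) ≤ (p.toList.length : Int) := by positivity
        have htl2 : (PySem.Str.slice u none (some (p.toList.length : Int))).toList
            = u.toList.take p.toList.length := by
          simp [PySem.Str.slice, PySem.List.slice_to _ h0]
        rw [htl2]
        exact (List.prefix_iff_eq_take.mp hpre).symm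
      rw [this]; exact hp

lemma pv_keepB_iff (s : List String) (u : String) :
    pvKeepB s u = true ↔ ∀ p ∈ s, p.toList <+: u.toList → p = u := by
  unfold pvKeepB
  rw [Bool.not_eq_true', ← Bool.not_eq_true, pv_any_prefix_iff]
  push_neg
  rfl

-- if u has any proper prefix in s, it has a proper prefix in s that B keeps
lemma pv_exists_min_prefix (s : List String) :
    ∀ (n : Nat) (u : String), u.toList.length ≤ n →
      (∃ p ∈ s, p.toList <+: u.toList ∧ p ≠ u) →
      ∃ k ∈ s, k.toList <+: u.toList ∧ k ≠ u ∧ pvKeepB s k = true := by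
  intro n
  induction n with
  | zero =>
    rintro u hu ⟨p, hp, hpre, hne⟩
    exact absurd (pv_proper_prefix_length_lt hpre hne) (by omega)
  | succ n ih =>
    rintro u hu ⟨p, hp, hpre, hne⟩
    by_cases hk : pvKeepB s p = true
    · exact ⟨p, hp, hpre, hne, hk⟩
    · have h2 : ¬ ∀ q ∈ s, q.toList <+: p.toList → q = p :=
        fun h => hk ((pv_keepB_iff s p).mpr h)
      push_neg at h2
      have hplt := pv_proper_prefix_length_lt hpre hne
      obtain ⟨k, hk1, hk2, hk3, hk4⟩ := ih p (by omega) h2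
      refine ⟨k, hk1, hk2.trans hpre, ?_, hk4⟩
      have hklt := pv_proper_prefix_length_lt hk2 hk3
      intro he
      rw [he] at hklt
      omega

-- loop invariant: A's kept list is exactly the processed prefix filtered by B's predicate
lemma pv_fold_inv (S : List String) :
    ∀ (L2 L1 : List String),
      (L1 ++ L2).Nodup →
      (L1 ++ L2).Pairwise (fun a b => PySem.Str.len a ≤ PySem.Str.len b) →
      (∀ x, x ∈ L1 ++ L2 ↔ x ∈ S) →
      L2.foldl
        (fun kept u =>
          if kept.any (fun k => PySem.Str.startswith u k) then kept
          else kept.filter (fun k => !(PySem.Str.startswith k u)) ++ [u])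
        (L1.filter (pvKeepB S))
      = (L1 ++ L2).filter (pvKeepB S) := by
  intro L2
  induction L2 with
  | nil => intro L1 _ _ _; simp
  | cons u t ih =>
    intro L1 hnd hpw hmem
    have huL1 : u ∉ L1 := fun h =>
      (List.nodup_append.mp hnd).2.2 u h u (List.mem_cons_self) rfl
    have hL1mem : ∀ x ∈ L1, x ∈ S := fun x hx => (hmem x).mp (by simp [hx])
    have hstep : (if (L1.filter (pvKeepB S)).any (fun k => PySem.Str.startswith u k)
          then L1.filter (pvKeepB S)
          else (L1.filter (pvKeepB S)).filter (fun k => !(PySem.Str.startswith k u)) ++ [u])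
        = (L1 ++ [u]).filter (pvKeepB S) := by
      by_cases hany : (L1.filter (pvKeepB S)).any (fun k => PySem.Str.startswith u k) = true
      · rw [if_pos hany]
        obtain ⟨k, hkf, hsw⟩ := List.any_eq_true.mp hany
        have hkL1 : k ∈ L1 := List.mem_of_mem_filter hkf
        have hkpre : k.toList <+: u.toList := by
          rw [PySem.Str.startswith_eq] at hsw
          exact (PySem.Chars.startswith_iff _ _).mp hsw
        have hkne : k ≠ u := fun h => huL1 (h ▸ hkL1)
        have hKu : pvKeepB S u = false := by
          rw [← Bool.not_eq_true, pv_keepB_iff]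
          push_neg
          exact ⟨k, hL1mem k hkL1, hkpre, hkne⟩
        simp [List.filter_append, hKu]
      · rw [if_neg hany]
        have hlenL1 : ∀ k ∈ L1, PySem.Str.len k ≤ PySem.Str.len u := fun k hk =>
          (List.pairwise_append.mp hpw).2.2 k hk u (List.mem_cons_self)
        have hKu : pvKeepB S u = true := by
          by_contra h
          have h2 : ¬ ∀ q ∈ S, q.toList <+: u.toList → q = u :=
            fun hh => h ((pv_keepB_iff S u).mpr hh)
          push_neg at h2
          obtain ⟨k, hkS, hkpre, hkne, hkkeep⟩ :=
            pv_exists_min_prefix S u.toList.length u le_rfl h2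
          have hklt := pv_proper_prefix_length_lt hkpre hkne
          rcases List.mem_append.mp ((hmem k).mpr hkS) with hkL1 | hkut
          · exact hany (List.any_eq_true.mpr
              ⟨k, List.mem_filter.mpr ⟨hkL1, hkkeep⟩, by
                rw [PySem.Str.startswith_eq]
                exact (PySem.Chars.startswith_iff _ _).mpr hkpre⟩)
          · rcases List.mem_cons.mp hkut with h' | h'
            · exact hkne h'
            · have := (List.pairwise_append.mp hpw).2
              have hle : PySem.Str.len u ≤ PySem.Str.len k :=
                (List.pairwise_cons.mp this.1).1 k h'
              rw [PySem.Str.len_eq, PySem.Str.len_eq] at hle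
              omega
        have hfix : (L1.filter (pvKeepB S)).filter (fun k => !(PySem.Str.startswith k u))
            = L1.filter (pvKeepB S) := by
          rw [List.filter_eq_self]
          intro k hkf
          have hkL1 : k ∈ L1 := List.mem_of_mem_filter hkf
          cases hb : PySem.Str.startswith k u
          · rfl
          · exfalso
            have hupre : u.toList <+: k.toList := by
              rw [PySem.Str.startswith_eq] at hb
              exact (PySem.Chars.startswith_iff _ _).mp hb
            have hle := hlenL1 k hkL1
            rw [PySem.Str.len_eq, PySem.Str.len_eq] at hle
            have : u.toList = k.toList :=
              hupre.eq_of_length_le (by exact_mod_cast hle)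
            exact huL1 (String.toList_inj.mp this.symm ▸ hkL1)
        rw [hfix]
        simp [List.filter_append, hKu]
    rw [List.foldl_cons, hstep]
    have hnd' : ((L1 ++ [u]) ++ t).Nodup := by
      rw [List.append_assoc]; simpa using hnd
    have hpw' : ((L1 ++ [u]) ++ t).Pairwise (fun a b => PySem.Str.len a ≤ PySem.Str.len b) := by
      rw [List.append_assoc]; simpa using hpw
    have hmem' : ∀ x, x ∈ (L1 ++ [u]) ++ t ↔ x ∈ S := fun x => by
      rw [List.append_assoc]
      simpa using hmem x
    have := ih (L1 ++ [u]) hnd' hpw' hmem'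
    rw [this, List.append_assoc]
    simp

-- ===== VERDICT (by name: the statement is the Claim_ definition above) =====
theorem dedupe_keep_shortest_spec : Claim_equal_dedupe_keep_shortest := by
  intro urls _
  unfold Spec_dedupe_keep_shortest dedupe_keep_shortest dedupe_keep_shortest_alt
  have hperm : (PySem.List.sorted2 (PySem.Set.ofList urls)
      (fun x => PySem.Str.len x) (fun x => x) false).Perm (PySem.Set.ofList urls) :=
    PySem.List.sorted2_perm _ _ _ _
  have hnd := hperm.symm.nodup (PySem.Set.nodup_ofList urls)
  have hpw := pv_sorted2_len_pairwise (PySem.Set.ofList urls)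
  have hmem : ∀ x, x ∈ ([] : List String) ++
      (PySem.List.sorted2 (PySem.Set.ofList urls)
        (fun x => PySem.Str.len x) (fun x => x) false) ↔ x ∈ PySem.Set.ofList urls :=
    fun x => by simpa using hperm.mem_iff
  have h := pv_fold_inv (PySem.Set.ofList urls)
    (PySem.List.sorted2 (PySem.Set.ofList urls) (fun x => PySem.Str.len x) (fun x => x) false)
    [] (by simpa using hnd) (by simpa using hpw) hmem
  simpa using h
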